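-- pv_equiv track=rewrite | github.com/Usable-AI-Redo/Streamlit-UI | app.py | format_response_with_sources
-- ===== SOURCE A (Python) =====
-- def format_response_with_sources(response_text):
--     # Check for source sections
--     source_markers = ["sources:", "references:", "citations:"]
--
--     # Find if any source marker exists in the response
--     source_index = -1
--     found_marker = None
--
--     for marker in source_markers:
--         if marker in response_text.lower():
--             idx = response_text.lower().find(marker)
--             if source_index == -1 or idx < source_index:
--                 source_index = idx
--                 found_marker = marker
--
--     # If no source section found, return the original text
--     if source_index == -1:
--         return response_text, None
--
--     # Split the response into main content and sources
--     main_content = response_text[:source_index].strip()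
--     sources_section = response_text[source_index:].strip()
--
--     return main_content, sources_section
-- ===== SOURCE B (Python) =====
-- def format_response_with_sources(response_text):
--     # Single left-to-right scan: stop at the first position where any marker starts.
--     low = response_text.lower()
--     markers = ("sources:", "references:", "citations:")
--     for i in range(len(low)):
--         if low.startswith(markers, i):
--             return response_text[:i].strip(), response_text[i:].strip()
--     return response_text, None
-- ===== Notes on version B (the rewrite author's own statement) =====
-- stated objective: alternative
-- what changed: Replaces the per-marker find + running-minimum loop by a single left-to-right positional scan that stops at the first index where any marker starts (tuple startswith).
import Mathlib
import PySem

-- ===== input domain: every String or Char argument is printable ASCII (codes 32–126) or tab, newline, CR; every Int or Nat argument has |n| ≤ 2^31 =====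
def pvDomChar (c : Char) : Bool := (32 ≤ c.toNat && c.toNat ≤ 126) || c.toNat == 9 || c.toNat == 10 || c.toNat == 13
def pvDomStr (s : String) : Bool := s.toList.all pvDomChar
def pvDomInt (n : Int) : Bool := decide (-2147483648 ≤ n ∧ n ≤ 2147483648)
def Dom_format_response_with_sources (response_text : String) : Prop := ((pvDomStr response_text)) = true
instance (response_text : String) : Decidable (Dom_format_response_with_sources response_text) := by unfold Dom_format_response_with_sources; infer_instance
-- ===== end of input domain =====

-- B replaces A's per-marker find + running-minimum loop by a single left-to-right scan
-- stopping at the first position where any marker starts (alternative; same cost).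

-- ===== PORT A =====
-- step of A's `for marker in source_markers` loop (running minimum of find positions)
def fmtStepA (response_text : String) (st : Int × Option String) (marker : String) : Int × Option String :=
  if PySem.Str.isIn marker (PySem.Str.lower response_text) then
    let idx := PySem.Str.find (PySem.Str.lower response_text) marker
    if st.1 = -1 ∨ idx < st.1 then (idx, some marker) else st
  else st

def format_response_with_sources (response_text : String) : String × Option String :=
  let source_markers : List String := ["sources:", "references:", "citations:"]
  let res := source_markers.foldl (fmtStepA response_text) (-1, none)
  if res.1 = -1 then (response_text, none)
  else (PySem.Str.strip (PySem.Str.slice response_text none (some res.1)),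
        PySem.Str.strip (PySem.Str.slice response_text (some res.1) none))

-- ===== PORT B =====
-- B's `for i in range(len(low))` scan: walk the suffixes of `low`, i counting the position
def fmtAltGo (response_text : String) (markers : List String) (low : List Char) (i : Nat) :
    String × Option String :=
  match low with
  | [] => (response_text, none)
  | c :: rest =>
    if markers.any (fun m => PySem.Chars.startswith (c :: rest) m.toList) then
      (PySem.Str.strip (PySem.Str.slice response_text none (some (i : Int))),
       some (PySem.Str.strip (PySem.Str.slice response_text (some (i : Int)) none)))
    else fmtAltGo response_text markers rest (i + 1)

def format_response_with_sources_alt (response_text : String) : String × Option String :=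
  fmtAltGo response_text ["sources:", "references:", "citations:"]
    (PySem.Str.lower response_text).toList 0

-- ===== PRECONDITION & SPEC =====
def Spec_format_response_with_sources (response_text : String) (out : String × Option String) : Prop := out = format_response_with_sources_alt response_text
instance (response_text : String) (out : String × Option String) : Decidable (Spec_format_response_with_sources response_text out) := by unfold Spec_format_response_with_sources; infer_instance

-- ===== CLAIM (what is proved, stated in full; the proofs are below) =====
def Claim_equal_format_response_with_sources : Prop := ∀ (response_text : String), Dom_format_response_with_sources response_text → Spec_format_response_with_sources response_text (format_response_with_sources response_text)

-- ===== LEMMAS AND PROOFS =====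

-- invariant of A's loop: r is -1 iff no processed marker occurs, else the least
-- position where a processed marker starts
def AInv (s : List Char) (Ms : List String) (r : Int) : Prop :=
  (r = -1 ∧ ∀ m ∈ Ms, ¬ m.toList <:+: s) ∨
  (0 ≤ r ∧ (∃ m ∈ Ms, m.toList <+: s.drop r.toNat) ∧
    ∀ i < r.toNat, ∀ m ∈ Ms, ¬ m.toList <+: s.drop i)

-- a string that is nowhere an infix starts at no position
lemma no_infix_no_prefix (m s : List Char) (h : ¬ m <:+: s) (i : Nat) : ¬ m <+: s.drop i :=
  fun hp => h ((PySem.Chars.isIn_iff_infix m s).1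
    ((PySem.Chars.exists_prefix_drop_iff_isIn m s).1 ⟨i, hp⟩))

lemma fmtStepA_inv (rt : String) (Ms : List String) (st : Int × Option String) (m : String)
    (h : AInv (PySem.Str.lower rt).toList Ms st.1) :
    AInv (PySem.Str.lower rt).toList (Ms ++ [m]) (fmtStepA rt st m).1 := by
  have hb : PySem.Str.isIn m (PySem.Str.lower rt) = PySem.Chars.isIn m.toList (PySem.Str.lower rt).toList := by
    simp [PySem.Str.isIn_eq]
  have hf : PySem.Str.find (PySem.Str.lower rt) m = PySem.Chars.find (PySem.Str.lower rt).toList m.toList := by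
    simp [PySem.Str.find_eq]
  set s := (PySem.Str.lower rt).toList with hs
  unfold fmtStepA
  by_cases hin : PySem.Str.isIn m (PySem.Str.lower rt) = true
  · rw [if_pos hin, hf]
    rw [hb] at hin
    have hfin : 0 ≤ PySem.Chars.find s m.toList := by
      rw [PySem.Chars.find_nonneg_iff]
      exact (PySem.Chars.isIn_iff_infix _ _).1 hin
    obtain ⟨hat, hbefore⟩ := PySem.Chars.find_spec hfin
    by_cases hc : st.1 = -1 ∨ PySem.Chars.find s m.toList < st.1
    · rw [if_pos hc]
      refine Or.inr ⟨hfin, ⟨m, by simp, hat⟩, ?_⟩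
      intro i hi m' hm'
      rcases List.mem_append.1 hm' with hm' | hm'
      · rcases h with ⟨h1, hno⟩ | ⟨hge, _, hmin⟩
        · exact no_infix_no_prefix _ _ (hno m' hm') i
        · have hlt : PySem.Chars.find s m.toList < st.1 := by
            cases hc with
            | inl h1 => omega
            | inr h2 => exact h2
          exact hmin i (by omega) m' hm'
      · simp at hm'; subst hm'
        exact hbefore i hi
    · rw [if_neg hc]
      push Not at hc
      obtain ⟨hne1, hle⟩ := hc
      rcases h with ⟨h1, _⟩ | ⟨hge, hex, hmin⟩
      · exact absurd h1 hne1
      · refine Or.inr ⟨hge, ?_, ?_⟩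
        · obtain ⟨m', hm', hp⟩ := hex
          exact ⟨m', List.mem_append.2 (Or.inl hm'), hp⟩
        · intro i hi m' hm'
          rcases List.mem_append.1 hm' with hm' | hm'
          · exact hmin i hi m' hm'
          · simp at hm'; subst hm'
            exact hbefore i (by omega)
  · rw [if_neg hin]
    rw [hb] at hin
    have hni : ¬ m.toList <:+: s :=
      (PySem.Chars.isIn_eq_false_iff _ _).1 (Bool.not_eq_true _ ▸ eq_false_of_ne_true hin)
    rcases h with ⟨h1, hno⟩ | ⟨hge, hex, hmin⟩
    · refine Or.inl ⟨h1, ?_⟩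
      intro m' hm'
      rcases List.mem_append.1 hm' with hm' | hm'
      · exact hno m' hm'
      · simp at hm'; subst hm'; exact hni
    · refine Or.inr ⟨hge, ?_, ?_⟩
      · obtain ⟨m', hm', hp⟩ := hex
        exact ⟨m', List.mem_append.2 (Or.inl hm'), hp⟩
      · intro i hi m' hm'
        rcases List.mem_append.1 hm' with hm' | hm'
        · exact hmin i hi m' hm'
        · simp at hm'; subst hm'
          exact no_infix_no_prefix _ _ hni i

lemma foldA_inv (rt : String) (rest : List String) : ∀ (Ms : List String) (st : Int × Option String),
    AInv (PySem.Str.lower rt).toList Ms st.1 →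
    AInv (PySem.Str.lower rt).toList (Ms ++ rest) ((rest.foldl (fmtStepA rt) st).1) := by
  induction rest with
  | nil => intro Ms st h; simpa using h
  | cons m rest ih =>
    intro Ms st h
    have := ih (Ms ++ [m]) (fmtStepA rt st m) (fmtStepA_inv rt Ms st m h)
    simpa [List.append_assoc] using this

lemma goB_nomatch (rt : String) (ms : List String)
    (hno : ∀ m ∈ ms, ¬ m.toList <:+: (PySem.Str.lower rt).toList) :
    ∀ (low : List Char) (i : Nat), low = (PySem.Str.lower rt).toList.drop i →
    fmtAltGo rt ms low i = (rt, none) := by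
  intro low
  induction low with
  | nil => intro i _; rfl
  | cons c rest ih =>
    intro i hlow
    unfold fmtAltGo
    rw [if_neg, ih (i + 1) (by simpa [List.drop_drop] using congrArg (List.drop 1) hlow)]
    simp only [List.any_eq_true, not_exists, not_and]
    intro m hm hsw
    exact no_infix_no_prefix _ _ (hno m hm) i
      (hlow ▸ (PySem.Chars.startswith_iff _ _).1 hsw)

lemma goB_match (rt : String) (ms : List String) (hne : ∀ m ∈ ms, m.toList ≠ []) (r : Nat)
    (hex : ∃ m ∈ ms, m.toList <+: (PySem.Str.lower rt).toList.drop r)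
    (hmin : ∀ j < r, ∀ m ∈ ms, ¬ m.toList <+: (PySem.Str.lower rt).toList.drop j) :
    ∀ (low : List Char) (i : Nat), low = (PySem.Str.lower rt).toList.drop i → i ≤ r →
    fmtAltGo rt ms low i =
      (PySem.Str.strip (PySem.Str.slice rt none (some (r : Int))),
       some (PySem.Str.strip (PySem.Str.slice rt (some (r : Int)) none))) := by
  intro low
  induction low with
  | nil =>
    intro i hlow hir
    exfalso
    obtain ⟨m, hm, hp⟩ := hex
    have hlen : (PySem.Str.lower rt).toList.length ≤ i := List.drop_eq_nil_iff.1 hlow.symm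
    have hdr : (PySem.Str.lower rt).toList.drop r = [] := List.drop_eq_nil_iff.2 (by omega)
    exact hne m hm (List.prefix_nil.1 (hdr ▸ hp))
  | cons c rest ih =>
    intro i hlow hir
    unfold fmtAltGo
    by_cases hieq : i = r
    · subst hieq
      rw [if_pos]
      obtain ⟨m, hm, hp⟩ := hex
      exact List.any_eq_true.2 ⟨m, hm, (PySem.Chars.startswith_iff _ _).2 (hlow ▸ hp)⟩
    · rw [if_neg, ih (i + 1) (by simpa [List.drop_drop] using congrArg (List.drop 1) hlow) (by omega)]
      simp only [List.any_eq_true, not_exists, not_and]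
      intro m hm hsw
      exact hmin i (by omega) m hm (hlow ▸ (PySem.Chars.startswith_iff _ _).1 hsw)

-- ===== VERDICT (by name: the statement is the Claim_ definition above) =====
theorem format_response_with_sources_spec : Claim_equal_format_response_with_sources := by
  intro rt _
  simp only [Spec_format_response_with_sources, format_response_with_sources,
    format_response_with_sources_alt]
  have hinv := foldA_inv rt ["sources:", "references:", "citations:"] [] ((-1 : Int), (none : Option String))
    (Or.inl ⟨rfl, by simp⟩)
  simp only [List.nil_append] at hinv
  rcases hinv with ⟨h1, hno⟩ | ⟨hge, hex, hmin⟩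
  · rw [h1]
    exact (goB_nomatch rt _ hno (PySem.Str.lower rt).toList 0 (by simp)).symm
  · rw [if_neg (by omega)]
    have := goB_match rt ["sources:", "references:", "citations:"]
      (by decide) (List.foldl (fmtStepA rt) (-1, none) ["sources:", "references:", "citations:"]).1.toNat
      hex hmin (PySem.Str.lower rt).toList 0 (by simp) (Nat.zero_le _)
    rw [this, Int.toNat_of_nonneg hge]
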